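-- pv_equiv track=rewrite | github.com/grobolom/twitter-CLI | TwitterCLI/reducers.py | _listOrder
-- ===== SOURCE A (Python) =====
-- def _listOrder(state):
--     keys = state['lists'].keys()
--
--     order = []
--     if 'tweets' in keys:
--         order += [ 'tweets' ]
--     if 'home_timeline' in keys:
--         order += [ 'home_timeline' ]
--
--     other_lists = []
--     for key in keys:
--         if key not in other_lists and key not in order:
--             other_lists += [ key ]
--     return order + sorted(other_lists)
-- ===== SOURCE B (Python) =====
-- def _listOrder(state):
--     rank = {'tweets': 0, 'home_timeline': 1}
--     return sorted(state['lists'].keys(), key=lambda k: (rank.get(k, 2), k))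
-- ===== Notes on version B (the rewrite author's own statement) =====
-- stated objective: idiomatic
-- what changed: Replaces A's partition-into-priority-prefix plus dedup-loop-then-sort-and-concatenate with a single keyed sort of all keys under the tuple key (rank, key), where rank maps 'tweets' to 0, 'home_timeline' to 1 and everything else to 2.
-- outside the precondition, e.g. on _listOrder({}): A raises KeyError, B raises KeyError
import Mathlib
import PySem

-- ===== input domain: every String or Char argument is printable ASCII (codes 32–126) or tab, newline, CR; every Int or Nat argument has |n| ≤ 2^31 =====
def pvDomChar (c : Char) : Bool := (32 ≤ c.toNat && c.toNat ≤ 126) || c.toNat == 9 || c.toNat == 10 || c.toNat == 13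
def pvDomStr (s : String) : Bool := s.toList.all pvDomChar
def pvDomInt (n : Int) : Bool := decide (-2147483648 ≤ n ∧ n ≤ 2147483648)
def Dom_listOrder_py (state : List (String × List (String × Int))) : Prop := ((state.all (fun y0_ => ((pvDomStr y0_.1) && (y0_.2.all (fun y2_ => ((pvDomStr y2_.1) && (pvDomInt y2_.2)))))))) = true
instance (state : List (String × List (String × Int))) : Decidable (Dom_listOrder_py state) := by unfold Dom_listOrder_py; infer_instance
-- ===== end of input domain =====

-- B replaces A's priority-prefix-then-dedup-loop-then-sort with one keyed sort under the tuple key (rank, key) (idiomatic).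


-- ===== PORT A =====
def listOrder_py (state : List (String × List (String × Int))) : List String :=
  match (PySem.Dict.mk state).get? "lists" with
  | none => []   -- Python raises KeyError here; excluded by Pre_listOrder_py
  | some lists =>
    let keys := (PySem.Dict.mk lists).keys
    let order : List String := []
    let order := if keys.contains "tweets" then order ++ ["tweets"] else order
    let order := if keys.contains "home_timeline" then order ++ ["home_timeline"] else order
    let otherLists := keys.foldl
      (fun acc key => if !acc.contains key && !order.contains key then acc ++ [key] else acc) []
    order ++ PySem.List.sorted otherLists (fun x => x) false

-- ===== PORT B =====
def pvRank : PySem.Dict String Int := PySem.Dict.mk [("tweets", 0), ("home_timeline", 1)]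

def listOrder_py_alt (state : List (String × List (String × Int))) : List String :=
  match (PySem.Dict.mk state).get? "lists" with
  | none => []   -- Python raises KeyError here; excluded by Pre_listOrder_py
  | some lists =>
    PySem.List.sorted2 (PySem.Dict.mk lists).keys (fun k => pvRank.getD k 2) (fun k => k)

-- ===== PRECONDITION & SPEC =====
-- Pre_ excludes states with no 'lists' key (there Python A raises KeyError, and so does B) and association
-- lists whose inner 'lists' value has duplicate keys, which do not represent any Python dict.
def Pre_listOrder_py (state : List (String × List (String × Int))) : Prop :=
  ((PySem.Dict.mk state).get? "lists").isSome = true ∧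
  (PySem.Dict.mk (((PySem.Dict.mk state).get? "lists").getD [])).keys.Nodup
instance (state : List (String × List (String × Int))) : Decidable (Pre_listOrder_py state) := by
  unfold Pre_listOrder_py; infer_instance

def pvWitness_listOrder_py : (List (String × List (String × Int))) := [("lists", [("a", 1), ("tweets", 2)])]

def Spec_listOrder_py (state : List (String × List (String × Int))) (out : List String) : Prop := out = listOrder_py_alt state
instance (state : List (String × List (String × Int))) (out : List String) : Decidable (Spec_listOrder_py state out) := by unfold Spec_listOrder_py; infer_instance

-- ===== CLAIM (what is proved, stated in full; the proofs are below) =====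
def Claim_equal_listOrder_py : Prop := ∀ (state : List (String × List (String × Int))), Dom_listOrder_py state → Pre_listOrder_py state → Spec_listOrder_py state (listOrder_py state)

-- ===== LEMMAS AND PROOFS =====

-- rank of every non-priority key
lemma pv_rank_other (k : String) (h1 : k ≠ "tweets") (h2 : k ≠ "home_timeline") :
    pvRank.getD k 2 = 2 := by
  have e1 : ("tweets" == k) = false := beq_eq_false_iff_ne.mpr (Ne.symm h1)
  have e2 : ("home_timeline" == k) = false := beq_eq_false_iff_ne.mpr (Ne.symm h2)
  simp [pvRank, PySem.Dict.getD, PySem.Dict.get?, List.find?, e1, e2]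

-- B's tuple-key sort is the plain sort under the lexicographic key
lemma pv_sorted2_eq_sorted_lex (xs : List String) (k1 : String → Int) :
    PySem.List.sorted2 xs k1 (fun k => k)
      = PySem.List.sorted xs (fun k => toLex (k1 k, k)) false := by
  rw [PySem.List.sorted_eq_foldl_insertBy]
  simp only [PySem.List.sorted2]
  have hcmp : (fun (a b : String) => decide (k1 a < k1 b) || !decide (k1 b < k1 a) && decide (a < b))
      = (fun (a b : String) => decide (toLex (k1 a, a) < toLex (k1 b, b))) := by
    funext a b
    rcases lt_trichotomy (k1 a) (k1 b) with h | h | h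
    · simp [Prod.Lex.lt_iff, h]
    · simp [Prod.Lex.lt_iff, h]
    · simp [Prod.Lex.lt_iff, h, lt_asymm h, h.ne']
  rw [hcmp]
  simp

-- A's dedup loop over a duplicate-free list is a filter
lemma pv_dedup_fold (l : List String) (order : List String) (acc : List String)
    (hn : l.Nodup) (hd : ∀ k ∈ l, acc.contains k = false) :
    l.foldl (fun acc key => if !acc.contains key && !order.contains key then acc ++ [key] else acc) acc
      = acc ++ l.filter (fun k => !order.contains k) := by
  induction l generalizing acc with
  | nil => simp
  | cons x t ih =>
    have hx : acc.contains x = false := hd x (by simp)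
    have hnt : t.Nodup := hn.of_cons
    have hxm : x ∉ acc := by simpa using hx
    by_cases ho : order.contains x = true
    · have hom : x ∈ order := by simpa using ho
      rw [List.foldl_cons, if_neg (by simp [hom]), List.filter_cons, if_neg (by simp [hom])]
      exact ih acc hnt (fun k hk => hd k (List.mem_cons_of_mem _ hk))
    · have hom : x ∉ order := by simpa using ho
      rw [List.foldl_cons, if_pos (by simp [hxm, hom]), List.filter_cons, if_pos (by simp [hom])]
      rw [ih (acc ++ [x]) hnt ?_]
      · simp
      · intro k hk
        have hkx : k ≠ x := by rintro rfl; exact (List.nodup_cons.mp hn).1 hk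
        have hka : k ∉ acc := by simpa using hd k (List.mem_cons_of_mem _ hk)
        simp [hka, hkx]

-- A's order list as one append expression
lemma pv_order_append (xs : List String) :
    (if xs.contains "home_timeline"
      then (if xs.contains "tweets" then ([] : List String) ++ ["tweets"] else []) ++ ["home_timeline"]
      else (if xs.contains "tweets" then ([] : List String) ++ ["tweets"] else []))
    = (if xs.contains "tweets" = true then ["tweets"] else [])
        ++ (if xs.contains "home_timeline" = true then ["home_timeline"] else []) := by
  by_cases h1 : "tweets" ∈ xs <;> by_cases h2 : "home_timeline" ∈ xs <;>
    simp [h1, h2]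

lemma pv_main (xs : List String) (hn : xs.Nodup) (order : List String)
    (horder : order = (if xs.contains "tweets" = true then ["tweets"] else [])
        ++ (if xs.contains "home_timeline" = true then ["home_timeline"] else [])) :
    order ++ PySem.List.sorted (xs.foldl
        (fun acc key => if !acc.contains key && !order.contains key then acc ++ [key] else acc) [])
        (fun x => x) false
      = PySem.List.sorted xs (fun k => toLex (pvRank.getD k 2, k)) false := by
  have hordmem : ∀ k, k ∈ order ↔ (k ∈ xs ∧ (k = "tweets" ∨ k = "home_timeline")) := by
    intro k
    rw [horder]
    by_cases h1 : xs.contains "tweets" = true <;> by_cases h2 : xs.contains "home_timeline" = true <;>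
        simp only [h1, h2, if_pos, if_neg, Bool.not_eq_true]
    · have m1 : "tweets" ∈ xs := by simpa using h1
      have m2 : "home_timeline" ∈ xs := by simpa using h2
      constructor
      · intro hk
        rcases (by simpa using hk : k = "tweets" ∨ k = "home_timeline") with rfl | rfl
        · exact ⟨m1, Or.inl rfl⟩
        · exact ⟨m2, Or.inr rfl⟩
      · rintro ⟨hx, rfl | rfl⟩ <;> simp
    · have m2 : "home_timeline" ∉ xs := by simpa using h2
      constructor
      · intro hk
        have : k = "tweets" := by simpa using hk
        subst this
        exact ⟨by simpa using h1, Or.inl rfl⟩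
      · rintro ⟨hx, rfl | rfl⟩
        · simp
        · exact absurd hx m2
    · have m1 : "tweets" ∉ xs := by simpa using h1
      constructor
      · intro hk
        have : k = "home_timeline" := by simpa using hk
        subst this
        exact ⟨by simpa using h2, Or.inr rfl⟩
      · rintro ⟨hx, rfl | rfl⟩
        · exact absurd hx m1
        · simp
    · have m1 : "tweets" ∉ xs := by simpa using h1
      have m2 : "home_timeline" ∉ xs := by simpa using h2
      constructor
      · intro hk
        exact absurd hk (by simp)
      · rintro ⟨hx, rfl | rfl⟩
        · exact absurd hx m1
        · exact absurd hx m2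
  have hordnodup : order.Nodup := by
    by_cases h1 : "tweets" ∈ xs <;> by_cases h2 : "home_timeline" ∈ xs <;>
      simp [horder, h1, h2]
  rw [pv_dedup_fold xs order [] hn (by simp)]
  have hothersnd : (xs.filter (fun k => !order.contains k)).Nodup := hn.filter _
  have hrank2 : ∀ k ∈ xs.filter (fun k => !order.contains k), pvRank.getD k 2 = 2 := by
    intro k hk
    have hko : k ∉ order := by simpa using List.of_mem_filter hk
    have hxk := List.mem_of_mem_filter hk
    refine pv_rank_other k ?_ ?_ <;> rintro rfl <;> exact hko ((hordmem _).mpr ⟨hxk, by simp⟩)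
  have hperm : (order ++ PySem.List.sorted (xs.filter (fun k => !order.contains k)) (fun x => x) false).Perm xs := by
    refine List.Perm.trans (List.Perm.append_left order (PySem.List.sorted_perm _ _ _)) ?_
    have hfo : (xs.filter (fun k => order.contains k)).Perm order := by
      rw [List.perm_ext_iff_of_nodup (hn.filter _) hordnodup]
      intro k
      simp only [List.mem_filter, List.contains_iff_mem, hordmem k]
      tauto
    have hfa := List.filter_append_perm (fun k => order.contains k) xs
    exact (List.Perm.append_right _ hfo.symm).trans hfa
  have hpw : List.Pairwise (fun a b => toLex (pvRank.getD a 2, a) < toLex (pvRank.getD b 2, b))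
      (order ++ PySem.List.sorted (xs.filter (fun k => !order.contains k)) (fun x => x) false) := by
    rw [List.pairwise_append]
    refine ⟨?_, ?_, ?_⟩
    · rw [horder]
      by_cases h1 : "tweets" ∈ xs <;> by_cases h2 : "home_timeline" ∈ xs <;>
        simp [h1, h2]
      decide
    · have hle := PySem.List.sorted_pairwise (xs.filter (fun k => !order.contains k)) (fun x => x)
      have hsnd : (PySem.List.sorted (xs.filter (fun k => !order.contains k)) (fun x => x) false).Nodup :=
        (PySem.List.sorted_perm _ (fun x => x) false).nodup_iff.mpr hothersnd
      refine (hle.and hsnd).imp_of_mem ?_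
      intro a b ha hb hab
      have ha' := (PySem.List.sorted_perm _ (fun x => x) false).mem_iff.mp ha
      have hb' := (PySem.List.sorted_perm _ (fun x => x) false).mem_iff.mp hb
      rw [Prod.Lex.lt_iff]
      right
      refine ⟨?_, ?_⟩
      · simp [hrank2 a ha', hrank2 b hb']
      · simpa using lt_of_le_of_ne hab.1 hab.2
    · intro a ha b hb
      have hb' := (PySem.List.sorted_perm _ (fun x => x) false).mem_iff.mp hb
      have hra : pvRank.getD a 2 = 0 ∨ pvRank.getD a 2 = 1 := by
        rcases ((hordmem a).mp ha).2 with rfl | rfl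
        · left; decide
        · right; decide
      rw [Prod.Lex.lt_iff]
      left
      rcases hra with h | h <;> simp [hrank2 b hb', h]
  exact (PySem.List.sorted_eq_of_perm_of_pairwise_lt xs _ _ hperm hpw).symm
-- the heart: on a duplicate-free key list, A's value is B's value
lemma pv_keys_eq (xs : List String) (hn : xs.Nodup) :
    (let order : List String := [];
     let order := if xs.contains "tweets" then order ++ ["tweets"] else order;
     let order := if xs.contains "home_timeline" then order ++ ["home_timeline"] else order;
     order ++ PySem.List.sorted (xs.foldl
       (fun acc key => if !acc.contains key && !order.contains key then acc ++ [key] else acc) [])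
       (fun x => x) false)
    = PySem.List.sorted2 xs (fun k => pvRank.getD k 2) (fun k => k) := by
  rw [pv_sorted2_eq_sorted_lex]
  show (if xs.contains "home_timeline"
      then (if xs.contains "tweets" then ([] : List String) ++ ["tweets"] else []) ++ ["home_timeline"]
      else (if xs.contains "tweets" then ([] : List String) ++ ["tweets"] else [])) ++ _ = _
  rw [pv_order_append]
  exact pv_main xs hn _ rfl

-- ===== VERDICT (by name: the statement is the Claim_ definition above) =====
theorem listOrder_py_spec : Claim_equal_listOrder_py := by
  intro state _hdom hpre
  unfold Spec_listOrder_py listOrder_py listOrder_py_alt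
  obtain ⟨hsome, hnd⟩ := hpre
  cases hget : (PySem.Dict.mk state).get? "lists" with
  | none => simp [hget] at hsome
  | some lists =>
    rw [hget] at hnd
    simp only [Option.getD_some] at hnd
    exact pv_keys_eq _ hnd
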